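-- pv_equiv track=rewrite | github.com/shoc71/profile-maker | profile_resources/terty.py | remove_extreme_apostrophe
-- ===== SOURCE A (Python) =====
-- def remove_extreme_apostrophe(name: str) -> str:
--
--     # Remove leading/trailing whitespace and newlines
--     name = name.strip()
--
--     # Remove apostrophe at the start
--     if name.startswith("'"):
--         name = name[1:]
--
--     # Remove apostrophe at the end
--     if name.endswith("'"):
--         name = name[:-1]
--
--     # Ensure apostrophe is followed by a lowercase letter
--     parts = name.split("'")
--     if len(parts) > 1:
--         for i in range(1, len(parts)):
--             if parts[i] and parts[i][0].isupper():
--                 parts[i] = parts[i][0].lower() + parts[i][1:]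
--         name = "'".join(parts)
--     return name
-- ===== SOURCE B (Python) =====
-- def remove_extreme_apostrophe(name: str) -> str:
--     # Same trimming as the original, then one linear pass instead of split/join.
--     name = name.strip()
--     if name.startswith("'"):
--         name = name[1:]
--     if name.endswith("'"):
--         name = name[:-1]
--     out = []
--     prev = False
--     for ch in name:
--         out.append(ch.lower() if prev and ch.isupper() else ch)
--         prev = ch == "'"
--     return "".join(out)
-- ===== Notes on version B (the rewrite author's own statement) =====
-- stated objective: simpler
-- what changed: Replaces the split-on-apostrophe / per-part-fix / join machinery with a single linear pass over the characters that carries a prev_was_apostrophe flag and lowercases the one character right after each apostrophe.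
import Mathlib
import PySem

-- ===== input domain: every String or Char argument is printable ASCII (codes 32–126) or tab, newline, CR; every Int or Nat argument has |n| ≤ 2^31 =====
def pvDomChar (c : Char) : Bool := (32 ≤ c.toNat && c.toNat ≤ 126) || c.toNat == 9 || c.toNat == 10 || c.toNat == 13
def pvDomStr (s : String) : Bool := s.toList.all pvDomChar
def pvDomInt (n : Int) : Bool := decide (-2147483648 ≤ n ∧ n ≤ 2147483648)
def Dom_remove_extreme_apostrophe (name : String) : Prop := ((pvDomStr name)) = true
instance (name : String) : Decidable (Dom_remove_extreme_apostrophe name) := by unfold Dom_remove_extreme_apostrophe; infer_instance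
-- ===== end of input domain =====

-- B replaces A's split/fix/join with one linear pass carrying a prev-was-apostrophe flag (simpler, same O(n) cost).

-- ===== PORT A =====
-- body of A's loop: if parts[i] and parts[i][0].isupper(): parts[i] = parts[i][0].lower() + parts[i][1:]
def fixPart (p : List Char) : List Char :=
  match p with
  | [] => p
  | c :: rest => if PySem.Chars.isupper c then PySem.Chars.lowerChar c :: rest else p

def remove_extreme_apostrophe (name : String) : String :=
  let name := PySem.Chars.strip name.toList
  let name := if PySem.Chars.startswith name ['\''] then PySem.List.slice name (some 1) none else name
  let name := if PySem.Chars.endswith name ['\''] then PySem.List.slice name none (some (-1)) else name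
  let parts := PySem.Chars.splitOn name ['\'']
  -- for i in range(1, len(parts)): fix parts[i]  — each cell is updated independently, i.e. the tail is mapped
  let name := if 1 < parts.length then
      PySem.Chars.join ['\''] (match parts with | [] => [] | p :: ps => p :: ps.map fixPart)
    else name
  String.ofList name

-- ===== PORT B =====
-- the single pass: emit ch.lower() when prev flag is set and ch is uppercase, else ch; flag := (ch == "'")
def altLoop : Bool → List Char → List Char
  | _, [] => []
  | prev, c :: rest =>
    (if prev && PySem.Chars.isupper c then PySem.Chars.lowerChar c else c) :: altLoop (c == '\'') rest

def remove_extreme_apostrophe_alt (name : String) : String :=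
  let t := PySem.Chars.strip name.toList
  let t := if PySem.Chars.startswith t ['\''] then t.tail else t          -- name[1:]
  let t := if PySem.Chars.endswith t ['\''] then t.dropLast else t       -- name[:-1]
  String.ofList (altLoop false t)

-- ===== PRECONDITION & SPEC =====
def Spec_remove_extreme_apostrophe (name : String) (out : String) : Prop := out = remove_extreme_apostrophe_alt name
instance (name : String) (out : String) : Decidable (Spec_remove_extreme_apostrophe name out) := by unfold Spec_remove_extreme_apostrophe; infer_instance

-- ===== CLAIM (what is proved, stated in full; the proofs are below) =====
def Claim_equal_remove_extreme_apostrophe : Prop := ∀ (name : String), Dom_remove_extreme_apostrophe name → Spec_remove_extreme_apostrophe name (remove_extreme_apostrophe name)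

-- ===== LEMMAS AND PROOFS =====

-- a structural-recursion characterisation of splitOn on the single-char separator '\''
def mySplit : List Char → List (List Char)
  | [] => [[]]
  | c :: rest =>
    if c = '\'' then [] :: mySplit rest
    else match mySplit rest with
      | [] => [[c]]
      | p :: ps => (c :: p) :: ps

theorem mySplit_ne_nil (cs : List Char) : mySplit cs ≠ [] := by
  cases cs with
  | nil => simp [mySplit]
  | cons c rest =>
    simp only [mySplit]
    split
    · simp
    · split <;> simp

theorem go_nil (n : Nat) (cur : List Char) (accs : List (List Char)) :
    PySem.Chars.splitOn.go ['\''] (n+1) [] cur accs = (cur.reverse :: accs).reverse := by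
  rw [PySem.Chars.splitOn.go]
  omega

theorem go_cons (n : Nat) (c : Char) (rest cur : List Char) (accs : List (List Char)) :
    PySem.Chars.splitOn.go ['\''] (n+1) (c :: rest) cur accs =
      if ['\''].isPrefixOf (c :: rest) then
        PySem.Chars.splitOn.go ['\''] n rest [] (cur.reverse :: accs)
      else PySem.Chars.splitOn.go ['\''] n rest (c :: cur) accs := by
  rw [PySem.Chars.splitOn.go]
  simp

theorem go_eq (fuel : Nat) : ∀ (l cur : List Char) (accs : List (List Char)),
    l.length < fuel →
    PySem.Chars.splitOn.go ['\''] fuel l cur accs =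
      accs.reverse ++ (match mySplit l with
        | [] => []
        | p :: ps => (cur.reverse ++ p) :: ps) := by
  induction fuel with
  | zero => intro l cur accs h; omega
  | succ n ih =>
    intro l cur accs h
    cases l with
    | nil => rw [go_nil]; simp [mySplit]
    | cons c rest =>
      rw [go_cons]
      by_cases hc : c = '\''
      · subst hc
        rw [if_pos (by simp [List.isPrefixOf])]
        rw [ih _ _ _ (by simpa using Nat.lt_of_succ_lt_succ h)]
        rcases hs : mySplit rest with _ | ⟨p, ps⟩
        · exact absurd hs (mySplit_ne_nil rest)
        · simp [mySplit, hs]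
      · rw [if_neg (by simp [List.isPrefixOf]; exact fun h' => absurd h'.symm hc)]
        rw [ih _ _ _ (by simpa using Nat.lt_of_succ_lt_succ h)]
        rcases hs : mySplit rest with _ | ⟨p, ps⟩
        · exact absurd hs (mySplit_ne_nil rest)
        · simp [mySplit, hc, hs]

theorem splitOn_eq_mySplit (cs : List Char) : PySem.Chars.splitOn cs ['\''] = mySplit cs := by
  rw [PySem.Chars.splitOn, go_eq _ _ _ _ (by omega)]
  rcases h : mySplit cs with _ | ⟨p, ps⟩
  · exact absurd h (mySplit_ne_nil cs)
  · simp

theorem altLoop_spec (cs : List Char) :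
    (altLoop false cs = (match mySplit cs with
        | [] => []
        | p :: ps => p ++ ps.flatMap (fun q => '\'' :: fixPart q))) ∧
    (altLoop true cs = (match mySplit cs with
        | [] => []
        | p :: ps => fixPart p ++ ps.flatMap (fun q => '\'' :: fixPart q))) := by
  induction cs with
  | nil => simp [altLoop, mySplit, fixPart]
  | cons c rest ih =>
    obtain ⟨ihf, iht⟩ := ih
    by_cases hc : c = '\''
    · subst hc
      rcases hs : mySplit rest with _ | ⟨p, ps⟩
      · exact absurd hs (mySplit_ne_nil rest)
      · rw [hs] at ihf iht
        constructor <;>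
          simp [altLoop, mySplit, hs, iht, PySem.Chars.isupper, fixPart]
    · rcases hs : mySplit rest with _ | ⟨p, ps⟩
      · exact absurd hs (mySplit_ne_nil rest)
      · rw [hs] at ihf iht
        have hbe : (c == '\'') = false := by simpa using hc
        constructor
        · simp [altLoop, mySplit, hc, hs, hbe, ihf]
        · simp only [altLoop, hbe, ihf, mySplit, if_neg hc, hs, Bool.true_and]
          by_cases hu : PySem.Chars.isupper c = true <;>
            simp [fixPart, hu]

theorem join_fix (p : List Char) (ps : List (List Char)) :
    PySem.Chars.join ['\''] (p :: ps.map fixPart) = p ++ ps.flatMap (fun q => '\'' :: fixPart q) := by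
  induction ps generalizing p with
  | nil => simp [PySem.Chars.join_singleton]
  | cons q qs ih => simp [PySem.Chars.join_cons_cons, ih]

theorem join_mySplit (cs : List Char) : PySem.Chars.join ['\''] (mySplit cs) = cs := by
  induction cs with
  | nil => simp [mySplit, PySem.Chars.join_singleton]
  | cons c rest ih =>
    by_cases hc : c = '\''
    · subst hc
      rcases hs : mySplit rest with _ | ⟨p, ps⟩
      · exact absurd hs (mySplit_ne_nil rest)
      · rw [hs] at ih
        simp [mySplit, hs, PySem.Chars.join_cons_cons, ih]
    · rcases hs : mySplit rest with _ | ⟨p, ps⟩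
      · exact absurd hs (mySplit_ne_nil rest)
      · rw [hs] at ih
        cases ps with
        | nil =>
          simp only [PySem.Chars.join_singleton] at ih
          simp [mySplit, hc, hs, PySem.Chars.join_singleton, ih]
        | cons q qs =>
          simp only [PySem.Chars.join_cons_cons] at ih
          simp [mySplit, hc, hs, PySem.Chars.join_cons_cons, ih]

theorem core (cs : List Char) :
    (if 1 < (PySem.Chars.splitOn cs ['\'']).length then
      PySem.Chars.join ['\''] (match PySem.Chars.splitOn cs ['\''] with | [] => [] | p :: ps => p :: ps.map fixPart)
    else cs) = altLoop false cs := by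
  rw [splitOn_eq_mySplit]
  rcases h : mySplit cs with _ | ⟨p, ps⟩
  · exact absurd h (mySplit_ne_nil cs)
  · have hb := (altLoop_spec cs).1
    rw [h] at hb
    cases ps with
    | nil =>
      simp only [List.length_cons, List.length_nil] at *
      rw [if_neg (by omega), hb]
      have := join_mySplit cs
      rw [h, PySem.Chars.join_singleton] at this
      simp [this]
    | cons q qs =>
      rw [if_pos (by simp)]
      simp only [join_fix, hb]

-- ===== VERDICT (by name: the statement is the Claim_ definition above) =====
theorem remove_extreme_apostrophe_spec : Claim_equal_remove_extreme_apostrophe := by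
  intro name _
  unfold Spec_remove_extreme_apostrophe remove_extreme_apostrophe remove_extreme_apostrophe_alt
  simp only [PySem.List.slice_from_one, PySem.List.slice_to_neg_one]
  rw [core]
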